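-- pv_equiv track=rewrite | github.com/steamdashboard/cs2-items-api | src/cs2_skins_api/rendered_media.py | choose_preferred_texture
-- ===== SOURCE A (Python) =====
-- def choose_preferred_texture(
--     paths: list[str],
--     required_prefix: str | None = None,
--     exclude_tokens: tuple[str, ...] = (),
-- ) -> str | None:
--     candidates = [
--         path
--         for path in paths
--         if path.endswith(".vtex_c") and (required_prefix is None or path.startswith(required_prefix))
--     ]
--     if not candidates:
--         return None
--
--     filtered = [
--         path
--         for path in candidates
--         if not any(token in path for token in exclude_tokens)
--     ]
--     if filtered:
--         return filtered[0]
--     return candidates[0]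
-- ===== SOURCE B (Python) =====
-- def choose_preferred_texture(
--     paths: list[str],
--     required_prefix: str | None = None,
--     exclude_tokens: tuple[str, ...] = (),
-- ) -> str | None:
--     first_candidate = None
--     for path in paths:
--         if not path.endswith(".vtex_c"):
--             continue
--         if required_prefix is not None and not path.startswith(required_prefix):
--             continue
--         if first_candidate is None:
--             first_candidate = path
--         if not any(token in path for token in exclude_tokens):
--             return path
--     return first_candidate
-- ===== Notes on version B (the rewrite author's own statement) =====
-- stated objective: alternative
-- what changed: Replaced the two list-building comprehensions plus post-hoc selection with a single loop that keeps only the first qualifying path and returns early at the first non-excluded one.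
import Mathlib
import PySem

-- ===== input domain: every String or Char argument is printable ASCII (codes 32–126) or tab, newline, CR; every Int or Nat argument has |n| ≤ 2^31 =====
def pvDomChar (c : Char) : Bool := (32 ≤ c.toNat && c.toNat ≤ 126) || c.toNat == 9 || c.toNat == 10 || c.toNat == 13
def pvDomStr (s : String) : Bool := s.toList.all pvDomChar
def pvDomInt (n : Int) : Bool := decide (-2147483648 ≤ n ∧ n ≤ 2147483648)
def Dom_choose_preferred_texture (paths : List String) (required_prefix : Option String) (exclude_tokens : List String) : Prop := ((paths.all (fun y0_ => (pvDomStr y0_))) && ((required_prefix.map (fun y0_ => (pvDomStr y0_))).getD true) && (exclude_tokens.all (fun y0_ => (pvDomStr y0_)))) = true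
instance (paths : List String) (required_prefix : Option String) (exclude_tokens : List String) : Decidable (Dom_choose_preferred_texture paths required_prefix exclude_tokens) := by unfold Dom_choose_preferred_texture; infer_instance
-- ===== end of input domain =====

-- B replaces A's two list-building passes by a single loop that remembers the
-- first qualifying path and returns early at the first non-excluded one
-- (objective: alternative decomposition, no intermediate lists).

-- ===== PORT A =====
-- the candidate condition of A's first comprehension
def pvQual (required_prefix : Option String) (path : String) : Bool :=
  PySem.Str.endswith path ".vtex_c" &&
    (match required_prefix with
     | none => true
     | some pre => PySem.Str.startswith path pre)

-- the "not excluded" condition of A's second comprehension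
def pvOk (exclude_tokens : List String) (path : String) : Bool :=
  !(exclude_tokens.any (fun token => PySem.Str.isIn token path))

-- A: build candidates, then the filtered list, then pick (candidates inlined).
def choose_preferred_texture (paths : List String) (required_prefix : Option String) (exclude_tokens : List String) : Option String :=
  if List.filter (pvQual required_prefix) paths = [] then none
  else
    match List.filter (pvOk exclude_tokens) (List.filter (pvQual required_prefix) paths) with
    | f :: _ => some f                                          -- filtered[0]
    | [] => (List.filter (pvQual required_prefix) paths).head?  -- candidates[0] (nonempty here)

-- ===== PORT B =====
-- B: one pass; `first` is the first qualifying path seen so far.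
def chooseAltLoop (required_prefix : Option String) (exclude_tokens : List String) : List String → Option String → Option String
  | [], first => first
  | path :: rest, first =>
    if !(PySem.Str.endswith path ".vtex_c") then
      chooseAltLoop required_prefix exclude_tokens rest first
    else if (match required_prefix with
             | none => false
             | some pre => !(PySem.Str.startswith path pre)) then
      chooseAltLoop required_prefix exclude_tokens rest first
    else
      let first' := match first with
        | none => some path
        | some f => some f
      if !(exclude_tokens.any (fun token => PySem.Str.isIn token path)) then
        some path
      else
        chooseAltLoop required_prefix exclude_tokens rest first'

def choose_preferred_texture_alt (paths : List String) (required_prefix : Option String) (exclude_tokens : List String) : Option String :=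
  chooseAltLoop required_prefix exclude_tokens paths none

-- ===== PRECONDITION & SPEC =====
def Spec_choose_preferred_texture (paths : List String) (required_prefix : Option String) (exclude_tokens : List String) (out : Option String) : Prop := out = choose_preferred_texture_alt paths required_prefix exclude_tokens
instance (paths : List String) (required_prefix : Option String) (exclude_tokens : List String) (out : Option String) : Decidable (Spec_choose_preferred_texture paths required_prefix exclude_tokens out) := by unfold Spec_choose_preferred_texture; infer_instance

-- ===== CLAIM (what is proved, stated in full; the proofs are below) =====
def Claim_equal_choose_preferred_texture : Prop := ∀ (paths : List String) (required_prefix : Option String) (exclude_tokens : List String), Dom_choose_preferred_texture paths required_prefix exclude_tokens → Spec_choose_preferred_texture paths required_prefix exclude_tokens (choose_preferred_texture paths required_prefix exclude_tokens)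

-- ===== LEMMAS AND PROOFS =====

-- Loop invariant: B's loop returns the head of A's doubly-filtered list if it
-- exists, otherwise the accumulator, otherwise the head of A's candidate list.
theorem chooseAltLoop_eq (required_prefix : Option String) (exclude_tokens : List String)
    (l : List String) (first : Option String) :
    chooseAltLoop required_prefix exclude_tokens l first =
      (match List.filter (pvOk exclude_tokens) (List.filter (pvQual required_prefix) l) with
       | f :: _ => some f
       | [] =>
         match first with
         | some f => some f
         | none => (List.filter (pvQual required_prefix) l).head?) := by
  cases required_prefix with
  | none =>
    induction l generalizing first with
    | nil => cases first <;> rfl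
    | cons path rest ih =>
      simp only [chooseAltLoop, Bool.false_eq_true, if_false]
      by_cases he : PySem.Str.endswith path ".vtex_c" = true
      · have hq : pvQual none path = true := by
          simp only [pvQual, he, Bool.and_true]
        simp only [he, Bool.not_true, Bool.false_eq_true, if_false]
        by_cases ha : (exclude_tokens.any (fun token => PySem.Str.isIn token path)) = true
        · -- excluded
          have hok : pvOk exclude_tokens path = false := by
            simp only [pvOk, ha, Bool.not_true]
          simp only [ha, Bool.not_true, Bool.false_eq_true, if_false]
          rw [ih, List.filter_cons_of_pos hq,
            List.filter_cons_of_neg (by simp only [hok, Bool.false_eq_true, not_false_eq_true])]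
          cases List.filter (pvOk exclude_tokens) (List.filter (pvQual none) rest) <;>
            cases first <;> rfl
        · -- not excluded: B returns it
          have ha' : (exclude_tokens.any (fun token => PySem.Str.isIn token path)) = false :=
            by cases h : exclude_tokens.any (fun token => PySem.Str.isIn token path)
               · rfl
               · exact absurd h ha
          have hok : pvOk exclude_tokens path = true := by
            simp only [pvOk, ha', Bool.not_false]
          simp only [ha', Bool.not_false, if_true]
          rw [List.filter_cons_of_pos hq, List.filter_cons_of_pos hok]
      · have he' : PySem.Str.endswith path ".vtex_c" = false :=
          by cases h : PySem.Str.endswith path ".vtex_c"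
             · rfl
             · exact absurd h he
        have hq' : pvQual none path = false := by
          simp only [pvQual, he', Bool.false_and]
        simp only [he', Bool.not_false, if_true]
        rw [ih, List.filter_cons_of_neg (by simp only [hq', Bool.false_eq_true, not_false_eq_true])]
  | some pre =>
    induction l generalizing first with
    | nil => cases first <;> rfl
    | cons path rest ih =>
      simp only [chooseAltLoop]
      by_cases he : PySem.Str.endswith path ".vtex_c" = true
      · simp only [he, Bool.not_true, Bool.false_eq_true, if_false]
        by_cases hs : PySem.Str.startswith path pre = true
        · have hq : pvQual (some pre) path = true := by
            simp only [pvQual, he, hs, Bool.and_self]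
          simp only [hs, Bool.not_true, Bool.false_eq_true, if_false]
          by_cases ha : (exclude_tokens.any (fun token => PySem.Str.isIn token path)) = true
          · have hok : pvOk exclude_tokens path = false := by
              simp only [pvOk, ha, Bool.not_true]
            simp only [ha, Bool.not_true, Bool.false_eq_true, if_false]
            rw [ih, List.filter_cons_of_pos hq,
              List.filter_cons_of_neg (by simp only [hok, Bool.false_eq_true, not_false_eq_true])]
            cases List.filter (pvOk exclude_tokens) (List.filter (pvQual (some pre)) rest) <;>
              cases first <;> rfl
          · have ha' : (exclude_tokens.any (fun token => PySem.Str.isIn token path)) = false :=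
              by cases h : exclude_tokens.any (fun token => PySem.Str.isIn token path)
                 · rfl
                 · exact absurd h ha
            have hok : pvOk exclude_tokens path = true := by
              simp only [pvOk, ha', Bool.not_false]
            simp only [ha', Bool.not_false, if_true]
            rw [List.filter_cons_of_pos hq, List.filter_cons_of_pos hok]
        · have hs' : PySem.Str.startswith path pre = false :=
            by cases h : PySem.Str.startswith path pre
               · rfl
               · exact absurd h hs
          have hq' : pvQual (some pre) path = false := by
            simp only [pvQual, hs', Bool.and_false]
          simp only [hs', Bool.not_false, if_true]
          rw [ih, List.filter_cons_of_neg (by simp only [hq', Bool.false_eq_true, not_false_eq_true])]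
      · have he' : PySem.Str.endswith path ".vtex_c" = false :=
          by cases h : PySem.Str.endswith path ".vtex_c"
             · rfl
             · exact absurd h he
        have hq' : pvQual (some pre) path = false := by
          simp only [pvQual, he', Bool.false_and]
        simp only [he', Bool.not_false, if_true]
        rw [ih, List.filter_cons_of_neg (by simp only [hq', Bool.false_eq_true, not_false_eq_true])]

-- ===== VERDICT (by name: the statement is the Claim_ definition above) =====
theorem choose_preferred_texture_spec : Claim_equal_choose_preferred_texture := by
  intro paths required_prefix exclude_tokens _
  unfold Spec_choose_preferred_texture choose_preferred_texture_alt choose_preferred_texture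
  rw [chooseAltLoop_eq]
  by_cases hemp : List.filter (pvQual required_prefix) paths = []
  · rw [if_pos hemp, hemp]
    rfl
  · rw [if_neg hemp]
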